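-- pv_equiv track=rewrite | github.com/NiamBashambu/DS-2500 | Marathon Data /utils.py | lst_to_dct
-- ===== SOURCE A (Python) =====
-- def lst_to_dct(lst):
--     dct = {}
--
--
--     for header in lst[0]:
--         dct[header]= []
--     for row in lst[1:]:
--         for i in range(len(row)):
--             dct[lst[0][i]].append(row[i])
--     return dct
-- ===== SOURCE B (Python) =====
-- def lst_to_dct(lst):
--     headers = lst[0]
--     rows = lst[1:]
--     # column-wise: for each header position j, gather the j-th cell of every
--     # row that has one
--     return {h: [row[j] for row in rows if j < len(row)]
--             for j, h in enumerate(headers)}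
-- ===== Notes on version B (the rewrite author's own statement) =====
-- stated objective: alternative
-- what changed: A initialises empty lists per header and then walks the table row-major, appending each cell to its header's list by per-cell index lookups; B builds the dict in one column-major dict comprehension, gathering the whole column for each header position at once.
-- outside the precondition, e.g. on lst_to_dct([['a', 'a'], ['1', '2']]): A returns {'a': ['1', '2']}, B returns {'a': ['2']}
import Mathlib
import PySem

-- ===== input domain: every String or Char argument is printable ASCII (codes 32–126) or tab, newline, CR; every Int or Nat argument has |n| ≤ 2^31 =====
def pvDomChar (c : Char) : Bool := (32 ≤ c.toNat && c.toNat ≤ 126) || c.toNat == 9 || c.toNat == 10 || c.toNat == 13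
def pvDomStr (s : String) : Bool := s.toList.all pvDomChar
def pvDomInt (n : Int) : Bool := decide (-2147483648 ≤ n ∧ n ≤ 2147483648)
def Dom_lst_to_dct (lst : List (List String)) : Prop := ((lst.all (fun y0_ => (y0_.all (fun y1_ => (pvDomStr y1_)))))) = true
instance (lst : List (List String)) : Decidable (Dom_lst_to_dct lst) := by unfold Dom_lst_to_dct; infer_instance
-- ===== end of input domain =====

-- B replaces A's row-major per-cell index-and-append with a column-major dict
-- comprehension (one column gathered per header position); alternative decomposition.


-- ===== PORT A =====
-- lst[0] raises IndexError on lst = []; Pre_ excludes that, so pyGetD's default is never used.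
-- dct[lst[0][i]] raises IndexError/KeyError when a row is longer than the header row;
-- Pre_ excludes that, so the pyGetD defaults and Dict.modify's insert-if-missing are never exercised.
def lst_to_dct (lst : List (List String)) : List (String × List String) :=
  let headers := PySem.List.pyGetD lst 0 []
  let dct : PySem.Dict String (List String) :=
    headers.foldl (fun d header => d.insert header []) PySem.Dict.empty
  let dct :=
    (PySem.List.slice lst (some 1) none).foldl (fun d row =>
      (PySem.List.pyRange 0 (row.length : Int) 1).foldl (fun d i =>
        d.modify (PySem.List.pyGetD headers i "") [] (fun v => v ++ [PySem.List.pyGetD row i ""])) d) dct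
  dct.items

-- ===== PORT B =====
-- {h: [row[j] for row in rows if j < len(row)] for j, h in enumerate(headers)}
-- the guarded comprehension is exactly filterMap of row[j] (pyGet? is some iff j < len(row), j ≥ 0);
-- lst[0] raises IndexError on lst = [] (excluded by Pre_), hence the unused pyGetD default.
def lst_to_dct_alt (lst : List (List String)) : List (String × List String) :=
  let headers := PySem.List.pyGetD lst 0 []
  let rows := PySem.List.slice lst (some 1) none
  ((PySem.List.enumerate headers).foldl (fun d jh =>
      d.insert jh.2 (rows.filterMap (fun row => PySem.List.pyGet? row jh.1)))
    PySem.Dict.empty).items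

-- ===== PRECONDITION & SPEC =====
-- Pre_ excludes: lst = [] (A raises IndexError); data rows longer than the header row
-- (A raises IndexError); and duplicate header names, on which A returns a dict whose
-- duplicated key holds the duplicate columns' cells merged into one shared list while
-- B keeps only the last duplicate's column — both are accidental readings of an
-- ill-formed table, so those inputs are outside the claim.
def Pre_lst_to_dct (lst : List (List String)) : Prop :=
  lst ≠ [] ∧ (lst.headD []).Nodup ∧ ∀ row ∈ lst.tail, row.length ≤ (lst.headD []).length
instance (lst : List (List String)) : Decidable (Pre_lst_to_dct lst) := by unfold Pre_lst_to_dct; infer_instance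

def pvWitness_lst_to_dct : List (List String) := [["a", "b"], ["1", "2"], ["3", "4"]]

def Spec_lst_to_dct (lst : List (List String)) (out : List (String × List String)) : Prop := out = lst_to_dct_alt lst
instance (lst : List (List String)) (out : List (String × List String)) : Decidable (Spec_lst_to_dct lst out) := by unfold Spec_lst_to_dct; infer_instance

-- ===== CLAIM (what is proved, stated in full; the proofs are below) =====
def Claim_equal_lst_to_dct : Prop := ∀ (lst : List (List String)), Dom_lst_to_dct lst → Pre_lst_to_dct lst → Spec_lst_to_dct lst (lst_to_dct lst)

-- ===== LEMMAS AND PROOFS =====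

-- canonical value of either dict: the headers in order, column j computed by c
def dictOf : List String → (Nat → List String) → List (String × List String)
  | [], _ => []
  | h :: t, c => (h, c 0) :: dictOf t (fun j => c (j + 1))

theorem dictOf_congr (H : List String) (c c' : Nat → List String)
    (h : ∀ j, c j = c' j) : dictOf H c = dictOf H c' := by
  rw [funext h]

theorem fst_mem_dictOf (H : List String) (c : Nat → List String)
    (p : String × List String) (hp : p ∈ dictOf H c) : p.1 ∈ H := by
  induction H generalizing c with
  | nil => simp [dictOf] at hp
  | cons h t ih =>
    simp only [dictOf, List.mem_cons] at hp
    rcases hp with rfl | hp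
    · simp
    · exact List.mem_cons_of_mem _ (ih _ hp)

theorem find?_dictOf (H : List String) (c : Nat → List String) (n : Nat)
    (hn : n < H.length) (hnd : H.Nodup) :
    (dictOf H c).find? (fun p => p.1 == H[n]) = some (H[n], c n) := by
  induction H generalizing c n with
  | nil => simp at hn
  | cons h t ih =>
    cases n with
    | zero => simp [dictOf]
    | succ m =>
      have hm : m < t.length := by simpa using hn
      have hne : h ≠ t[m] := by
        intro he
        exact (List.nodup_cons.mp hnd).1 (he ▸ List.getElem_mem hm)
      have hb : (h == t[m]) = false := by simpa using hne
      simp [dictOf, List.find?_cons, hb, ih (fun j => c (j + 1)) m hm (List.nodup_cons.mp hnd).2]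

theorem getD_dictOf (H : List String) (c : Nat → List String) (n : Nat)
    (hn : n < H.length) (hnd : H.Nodup) (dflt : List String) :
    (PySem.Dict.mk (dictOf H c)).getD (H[n]) dflt = c n := by
  simp [PySem.Dict.getD, PySem.Dict.get?, find?_dictOf H c n hn hnd]

theorem contains_dictOf (H : List String) (c : Nat → List String) (n : Nat)
    (hn : n < H.length) (hnd : H.Nodup) :
    (PySem.Dict.mk (dictOf H c)).contains (H[n]) = true := by
  have := List.mem_of_find?_eq_some (find?_dictOf H c n hn hnd)
  simp only [PySem.Dict.contains, List.any_eq_true]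
  exact ⟨_, this, by simp⟩

theorem replace_dictOf (H : List String) (c : Nat → List String) (n : Nat)
    (hn : n < H.length) (hnd : H.Nodup) (v : List String) :
    (dictOf H c).map (fun p => if p.1 == H[n] then (H[n], v) else p)
      = dictOf H (fun j => if j = n then v else c j) := by
  induction H generalizing c n with
  | nil => simp [dictOf]
  | cons h t ih =>
    obtain ⟨hht, hndt⟩ := List.nodup_cons.mp hnd
    cases n with
    | zero =>
      simp only [dictOf, List.map_cons, List.getElem_cons_zero]
      rw [if_pos (by simp)]
      refine congrArg₂ _ rfl ?_
      rw [dictOf_congr t (fun j => if j + 1 = 0 then v else c (j + 1)) (fun j => c (j + 1)) (by simp)]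
      refine Eq.trans (List.map_congr_left ?_) (List.map_id _)
      intro p hp
      have : p.1 ≠ h := fun he => hht (he ▸ fst_mem_dictOf t _ p hp)
      simp [this]
    | succ m =>
      have hm : m < t.length := by simpa using hn
      have hne : h ≠ t[m] := fun he => hht (he ▸ List.getElem_mem hm)
      simp only [dictOf, List.map_cons, List.getElem_cons_succ]
      rw [if_neg (by simpa using hne)]
      refine congrArg₂ _ rfl ?_
      rw [ih (fun j => c (j + 1)) m hm hndt]
      exact dictOf_congr _ _ _ (by intro j; simp)

theorem modify_dictOf (H : List String) (c : Nat → List String) (n : Nat)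
    (hn : n < H.length) (hnd : H.Nodup) (dflt : List String) (f : List String → List String) :
    PySem.Dict.modify (PySem.Dict.mk (dictOf H c)) (H[n]) dflt f
      = PySem.Dict.mk (dictOf H (fun j => if j = n then f (c j) else c j)) := by
  rw [PySem.Dict.modify, getD_dictOf H c n hn hnd, PySem.Dict.insert,
    if_pos (contains_dictOf H c n hn hnd)]
  refine congrArg _ ?_
  rw [replace_dictOf H c n hn hnd]
  exact dictOf_congr _ _ _ (by intro j; by_cases h : j = n <;> simp [h])

theorem insert_append (D : List (String × List String)) (k : String) (v : List String)
    (h : ∀ p ∈ D, p.1 ≠ k) :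
    PySem.Dict.insert (PySem.Dict.mk D) k v = PySem.Dict.mk (D ++ [(k, v)]) := by
  rw [PySem.Dict.insert, if_neg]
  simp only [PySem.Dict.contains, List.any_eq_true, not_exists, not_and, Bool.not_eq_true]
  intro p hp
  simpa using h p hp

theorem init_fold (H : List String) (D : List (String × List String))
    (hnd : H.Nodup) (hdisj : ∀ p ∈ D, p.1 ∉ H) :
    H.foldl (fun d header => d.insert header []) (PySem.Dict.mk D)
      = PySem.Dict.mk (D ++ dictOf H (fun _ => [])) := by
  induction H generalizing D with
  | nil => simp [dictOf]
  | cons h t ih =>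
    obtain ⟨hht, hndt⟩ := List.nodup_cons.mp hnd
    rw [List.foldl_cons, insert_append D h [] (fun p hp he => hdisj p hp (he ▸ List.mem_cons_self)),
      ih (D ++ [(h, [])]) hndt]
    · simp [dictOf]
    · intro p hp
      rcases List.mem_append.mp hp with hp | hp
      · exact fun hm => hdisj p hp (List.mem_cons_of_mem _ hm)
      · simp at hp
        rw [show p.1 = h from by rw [hp]]
        exact hht

theorem inner_fold (H : List String) (hnd : H.Nodup) (row : List String)
    (hrow : row.length ≤ H.length) (c : Nat → List String) (n : Nat) (hn : n ≤ row.length) :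
    (List.range n).foldl (fun d (k : Nat) =>
        PySem.Dict.modify d (PySem.List.pyGetD H (k : Int) "") []
          (fun v => v ++ [PySem.List.pyGetD row (k : Int) ""])) (PySem.Dict.mk (dictOf H c))
      = PySem.Dict.mk (dictOf H (fun j => if j < n then c j ++ [row.getD j ""] else c j)) := by
  induction n with
  | zero => simp
  | succ m ih =>
    have hm : m < row.length := hn
    have hmH : m < H.length := lt_of_lt_of_le hm hrow
    rw [List.range_succ, List.foldl_append, ih (le_of_lt hm), List.foldl_cons, List.foldl_nil]
    have hH : PySem.List.pyGetD H (m : Int) "" = H[m] := by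
      rw [PySem.List.pyGetD_natCast, List.getD_eq_getElem H "" hmH]
    rw [hH, modify_dictOf H _ m hmH hnd]
    refine congrArg _ (dictOf_congr _ _ _ ?_)
    intro j
    by_cases hj : j = m
    · subst hj
      simp [lt_irrefl, Nat.lt_succ_self, PySem.List.pyGetD_natCast]
    · by_cases hj2 : j < m <;> simp [hj, hj2] <;> omega

theorem rows_fold (H : List String) (hnd : H.Nodup) (rows : List (List String))
    (hr : ∀ r ∈ rows, r.length ≤ H.length) (c : Nat → List String) :
    rows.foldl (fun d row =>
        (List.range row.length).foldl (fun d (k : Nat) =>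
          PySem.Dict.modify d (PySem.List.pyGetD H (k : Int) "") []
            (fun v => v ++ [PySem.List.pyGetD row (k : Int) ""])) d) (PySem.Dict.mk (dictOf H c))
      = PySem.Dict.mk (dictOf H (fun j => c j ++ rows.filterMap (fun r => r[j]?))) := by
  induction rows generalizing c with
  | nil => simp
  | cons r rest ih =>
    rw [List.foldl_cons,
      inner_fold H hnd r (hr r List.mem_cons_self) c r.length le_rfl,
      ih (fun r hr' => hr r (List.mem_cons_of_mem _ hr')) _]
    refine congrArg _ (dictOf_congr _ _ _ ?_)
    intro j
    by_cases hj : j < r.length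
    · have h1 : r[j]? = some r[j] := List.getElem?_eq_getElem hj
      simp [hj, List.filterMap_cons, h1, List.getD_eq_getElem r "" hj]
    · have : r[j]? = none := List.getElem?_eq_none (le_of_not_gt hj)
      simp [hj, List.filterMap_cons, this]

theorem b_fold (H : List String) (g : Int → List String) (s : Int)
    (D : List (String × List String)) (hnd : H.Nodup) (hdisj : ∀ p ∈ D, p.1 ∉ H) :
    (PySem.List.enumerate H s).foldl (fun d jh => d.insert jh.2 (g jh.1)) (PySem.Dict.mk D)
      = PySem.Dict.mk (D ++ dictOf H (fun j => g (s + (j : Int)))) := by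
  induction H generalizing s D with
  | nil => simp [PySem.List.enumerate, dictOf]
  | cons h t ih =>
    obtain ⟨hht, hndt⟩ := List.nodup_cons.mp hnd
    rw [PySem.List.enumerate_cons, List.foldl_cons,
      insert_append D h (g s) (fun p hp he => hdisj p hp (he ▸ List.mem_cons_self)),
      ih (s + 1) (D ++ [(h, g s)]) hndt]
    · rw [List.append_assoc]
      refine congrArg _ (congrArg _ ?_)
      simp only [dictOf, List.cons_append, List.nil_append]
      refine congrArg₂ _ (by simp) ?_
      exact dictOf_congr _ _ _ (by intro j; congr 1; push_cast; ring)
    · intro p hp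
      rcases List.mem_append.mp hp with hp | hp
      · exact fun hm => hdisj p hp (List.mem_cons_of_mem _ hm)
      · simp at hp
        rw [show p.1 = h from by rw [hp]]
        exact hht

-- ===== VERDICT (by name: the statement is the Claim_ definition above) =====
theorem lst_to_dct_spec : Claim_equal_lst_to_dct := by
  intro lst _ hpre
  obtain ⟨hne, hnd, hle⟩ := hpre
  unfold Spec_lst_to_dct
  cases lst with
  | nil => exact absurd rfl hne
  | cons H rest =>
    simp only [List.headD_cons, List.tail_cons] at hnd hle
    have hhd : PySem.List.pyGetD (H :: rest) 0 [] = H := PySem.List.pyGetD_zero_cons _ _ _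
    have hsl : PySem.List.slice (H :: rest) (some 1) none = rest := by
      rw [PySem.List.slice_from_one]; rfl
    simp only [lst_to_dct, lst_to_dct_alt, hhd, hsl]
    simp only [PySem.List.pyRange_one, sub_zero, Int.toNat_natCast, List.foldl_map, zero_add]
    rw [show (PySem.Dict.empty : PySem.Dict String (List String)) = PySem.Dict.mk [] from rfl,
      init_fold H [] hnd (by simp), b_fold H (fun i => rest.filterMap (fun row => PySem.List.pyGet? row i)) 0 [] hnd (by simp)]
    simp only [List.nil_append]
    rw [rows_fold H hnd rest hle (fun _ => [])]
    simp only [List.nil_append, PySem.List.pyGet?_natCast, zero_add]
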